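-- pv_equiv track=rewrite | github.com/Netflix/repokid | repokid/utils/permissions.py | convert_repoable_perms_to_perms_and_services
-- ===== SOURCE A (Python) =====
-- from collections import defaultdict
-- from typing import Set
-- from typing import Tuple
--
-- def convert_repoable_perms_to_perms_and_services(
--     total_permissions: Set[str], repoable_permissions: Set[str]
-- ) -> Tuple[Set[str], Set[str]]:
--     """
--     Take a list of total permissions and repoable permissions and determine whether only a few permissions are being
--     repoed or if the entire service (all permissions from that service) are being removed.
--
--     Args:
--         total_permissions (set): A list of the total permissions a role has
--         repoable_permissions (set): A list of repoable permissions suggested to be removed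
--
--     Returns:
--         set: Set of permissions that will be individually removed but other permissions from the service will
--               be kept
--         set: Set of services that will be completely removed
--     """
--     repoed_permissions: Set[str] = set()
--     repoed_services: Set[str] = set()
--
--     total_perms_by_service = defaultdict(list)
--     repoable_perms_by_service = defaultdict(list)
--
--     # group total permissions and repoable permissions by service
--     for perm in total_permissions:
--         total_perms_by_service[perm.split(":")[0]].append(perm)
--
--     for perm in repoable_permissions:
--         repoable_perms_by_service[perm.split(":")[0]].append(perm)
--
--     for service in repoable_perms_by_service:
--         if all(
--             perm in repoable_perms_by_service[service]
--             for perm in total_perms_by_service[service]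
--         ):
--             repoed_services.add(service)
--         else:
--             repoed_permissions.update(
--                 perm for perm in repoable_perms_by_service[service]
--             )
--
--     return repoed_permissions, repoed_services
-- ===== SOURCE B (Python) =====
-- from typing import Set
-- from typing import Tuple
--
--
-- def convert_repoable_perms_to_perms_and_services(
--     total_permissions: Set[str], repoable_permissions: Set[str]
-- ) -> Tuple[Set[str], Set[str]]:
--     # Services that keep at least one permission after repoing.
--     kept = set(total_permissions) - set(repoable_permissions)
--     surviving_services = {p.split(":")[0] for p in kept}
--
--     repoed_permissions: Set[str] = set()
--     repoed_services: Set[str] = set()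
--     for service in dict.fromkeys(p.split(":")[0] for p in repoable_permissions):
--         if service in surviving_services:
--             repoed_permissions.update(
--                 p for p in repoable_permissions if p.split(":")[0] == service
--             )
--         else:
--             repoed_services.add(service)
--     return repoed_permissions, repoed_services
-- ===== Notes on version B (the rewrite author's own statement) =====
-- stated objective: simpler
-- what changed: Replaces grouping both inputs into per-service defaultdicts and the per-service all()-over-list-membership subset check by one set difference: a service is fully repoed iff no permission in total - repoable belongs to it.
import Mathlib
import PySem

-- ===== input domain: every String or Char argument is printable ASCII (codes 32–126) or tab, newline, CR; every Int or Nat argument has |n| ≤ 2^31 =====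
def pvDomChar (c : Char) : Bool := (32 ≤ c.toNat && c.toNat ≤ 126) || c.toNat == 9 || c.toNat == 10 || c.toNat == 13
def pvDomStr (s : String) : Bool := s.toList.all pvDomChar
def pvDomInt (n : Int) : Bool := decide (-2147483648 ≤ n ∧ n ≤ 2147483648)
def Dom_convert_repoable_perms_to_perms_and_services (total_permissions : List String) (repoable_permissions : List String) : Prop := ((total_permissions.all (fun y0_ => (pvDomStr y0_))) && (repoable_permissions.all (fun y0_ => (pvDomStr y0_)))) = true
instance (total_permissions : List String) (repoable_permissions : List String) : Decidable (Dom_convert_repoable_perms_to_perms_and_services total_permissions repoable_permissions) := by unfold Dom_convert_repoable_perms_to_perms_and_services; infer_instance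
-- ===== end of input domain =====

-- B computes surviving services once via set difference instead of grouping both inputs
-- into per-service dicts and running a per-service all()-membership subset check (objective: simpler).
-- Inputs/outputs are Python sets: the outputs are PySem.Sets, compared as finite sets.

-- perm.split(":")[0]: split? is none only for an empty separator, and the result is never empty,
-- so getD []/headD "" are exact here
def pvService (p : String) : String := (((PySem.Str.split? p ":").getD []).headD "")

-- ===== PORT A =====
def convert_repoable_perms_to_perms_and_services (total_permissions : List String) (repoable_permissions : List String) : List String × List String :=
  -- total_perms_by_service / repoable_perms_by_service: defaultdict(list) grouping loops
  let total_by : PySem.Dict String (List String) :=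
    total_permissions.foldl (fun d p => d.modify (pvService p) [] (· ++ [p])) PySem.Dict.empty
  let repo_by : PySem.Dict String (List String) :=
    repoable_permissions.foldl (fun d p => d.modify (pvService p) [] (· ++ [p])) PySem.Dict.empty
  -- for service in repoable_perms_by_service: all(...) → repoed_services.add / repoed_permissions.update
  (repo_by.keys).foldl
    (fun (st : PySem.Set String × PySem.Set String) s =>
      if (total_by.getD s []).all (fun p => (repo_by.getD s []).contains p) then
        (st.1, PySem.Set.add st.2 s)
      else
        (PySem.Set.update st.1 (repo_by.getD s []), st.2))
    (PySem.Set.empty, PySem.Set.empty)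

-- ===== PORT B =====
def convert_repoable_perms_to_perms_and_services_alt (total_permissions : List String) (repoable_permissions : List String) : List String × List String :=
  let kept : PySem.Set String :=
    PySem.Set.diff (PySem.Set.ofList total_permissions) (PySem.Set.ofList repoable_permissions)
  let surviving : PySem.Set String := PySem.Set.ofList (kept.map pvService)
  (PySem.List.dedup (repoable_permissions.map pvService)).foldl
    (fun (st : PySem.Set String × PySem.Set String) s =>
      if PySem.Set.contains surviving s then
        (PySem.Set.update st.1 (repoable_permissions.filter (fun p => pvService p == s)), st.2)
      else
        (st.1, PySem.Set.add st.2 s))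
    (PySem.Set.empty, PySem.Set.empty)

-- ===== PRECONDITION & SPEC =====
def Spec_convert_repoable_perms_to_perms_and_services (total_permissions : List String) (repoable_permissions : List String) (out : List String × List String) : Prop := out = convert_repoable_perms_to_perms_and_services_alt total_permissions repoable_permissions
instance (total_permissions : List String) (repoable_permissions : List String) (out : List String × List String) : Decidable (Spec_convert_repoable_perms_to_perms_and_services total_permissions repoable_permissions out) := by unfold Spec_convert_repoable_perms_to_perms_and_services; infer_instance

-- ===== CLAIM (what is proved, stated in full; the proofs are below) =====
def Claim_equal_convert_repoable_perms_to_perms_and_services : Prop := ∀ (total_permissions : List String) (repoable_permissions : List String), Dom_convert_repoable_perms_to_perms_and_services total_permissions repoable_permissions → Spec_convert_repoable_perms_to_perms_and_services total_permissions repoable_permissions (convert_repoable_perms_to_perms_and_services total_permissions repoable_permissions)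

-- ===== LEMMAS AND PROOFS =====

-- a defaultdict(list) grouping loop read back: d[s] is the sublist of elements with service s
lemma pv_grouped (l : List String) (s : String) :
    ((l.foldl (fun d p => d.modify (pvService p) [] (· ++ [p])) PySem.Dict.empty).getD s [])
      = l.filter (fun p => pvService p == s) := by
  have h := PySem.Dict.getD_foldl_modify_append (l := l.map (fun p => (pvService p, p)))
    (d := (PySem.Dict.empty : PySem.Dict String (List String))) (c := s)
  rw [List.foldl_map] at h
  simpa [List.filter_map, List.map_map, Function.comp_def] using h

-- A's per-service subset test equals "no surviving permission has this service"
lemma pv_cond (total repo : List String) (s : String) :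
    ((total.filter (fun p => pvService p == s)).all
        (fun p => (repo.filter (fun p => pvService p == s)).contains p))
      = !(PySem.Set.contains
            (PySem.Set.ofList
              ((PySem.Set.diff (PySem.Set.ofList total) (PySem.Set.ofList repo)).map pvService)) s) := by
  rw [Bool.eq_iff_iff]
  simp only [List.all_eq_true, List.mem_filter, List.contains_iff_mem, Bool.not_eq_true',
    ← Bool.not_eq_true, PySem.Set.contains_iff, PySem.Set.mem_ofList, List.mem_map,
    PySem.Set.mem_diff, beq_iff_eq]
  constructor
  · rintro h ⟨p, ⟨hpt, hpr⟩, hps⟩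
    exact hpr (h p ⟨hpt, hps⟩).1
  · intro h p ⟨hpt, hps⟩
    by_cases hpr : p ∈ repo
    · exact ⟨hpr, hps⟩
    · exact absurd ⟨p, ⟨hpt, hpr⟩, hps⟩ h

-- ===== VERDICT (by name: the statement is the Claim_ definition above) =====
theorem convert_repoable_perms_to_perms_and_services_spec : Claim_equal_convert_repoable_perms_to_perms_and_services := by
  intro total repo _
  unfold Spec_convert_repoable_perms_to_perms_and_services
  unfold convert_repoable_perms_to_perms_and_services convert_repoable_perms_to_perms_and_services_alt
  have hkeys : (repo.foldl (fun d p => d.modify (pvService p) [] (· ++ [p]))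
      (PySem.Dict.empty : PySem.Dict String (List String))).keys
      = PySem.List.dedup (repo.map pvService) := by
    rw [PySem.Dict.keys_foldl_modify_key]
    simp [PySem.Set.update, PySem.Set.ofList_eq_foldl, PySem.Dict.empty, PySem.Dict.keys]
  simp only [hkeys]
  apply PySem.List.foldl_congr_mem'
  intro s _ st
  rw [pv_grouped, pv_grouped, pv_cond]
  cases h : PySem.Set.contains
      (PySem.Set.ofList ((PySem.Set.diff (PySem.Set.ofList total) (PySem.Set.ofList repo)).map pvService)) s <;>
    simp
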